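-- pv_equiv track=rewrite | github.com/TrudySchwartz331/satisfaculty | satisfaculty/utils.py | expand_days_any
-- ===== SOURCE A (Python) =====
-- def expand_days_any(days_str):
--     """Expand any day combination to individual days. MW -> [M, W], THF -> [TH, F]."""
--     days = []
--     i = 0
--     while i < len(days_str):
--         if days_str[i:i + 2] == "TH":
--             days.append("TH")
--             i += 2
--         else:
--             days.append(days_str[i])
--             i += 1
--     return days
-- ===== SOURCE B (Python) =====
-- def expand_days_any(days_str):
--     """Expand any day combination to individual days. MW -> [M, W], THF -> [TH, F].
--
--     Single-pass state machine over the characters: a seen-but-unemitted 'T'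
--     is held in `pending` instead of slicing with a lookahead index.
--     """
--     out = []
--     pending = False  # a 'T' seen and not yet emitted
--     for ch in days_str:
--         if pending and ch == 'H':
--             out.append("TH")
--             pending = False
--         elif ch == 'T':
--             if pending:
--                 out.append("T")
--             pending = True
--         else:
--             if pending:
--                 out.append("T")
--                 pending = False
--             out.append(ch)
--     if pending:
--         out.append("T")
--     return out
-- ===== Notes on version B (the rewrite author's own statement) =====
-- stated objective: alternative
-- what changed: Replaced the index-and-slice lookahead loop by a single pass over the characters with a one-bit state (a 'T' seen but not yet emitted), so no slicing or index arithmetic is needed.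
import Mathlib
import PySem

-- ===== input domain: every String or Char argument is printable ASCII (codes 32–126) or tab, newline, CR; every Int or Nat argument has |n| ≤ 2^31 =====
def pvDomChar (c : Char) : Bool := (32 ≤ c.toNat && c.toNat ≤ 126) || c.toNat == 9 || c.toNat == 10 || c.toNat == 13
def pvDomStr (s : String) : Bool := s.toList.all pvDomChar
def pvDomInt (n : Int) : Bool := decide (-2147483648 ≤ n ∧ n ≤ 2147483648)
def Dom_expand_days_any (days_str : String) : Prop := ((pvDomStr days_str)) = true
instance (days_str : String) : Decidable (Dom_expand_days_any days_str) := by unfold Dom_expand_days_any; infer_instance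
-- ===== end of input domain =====

-- B replaces A's index/slice lookahead loop by a one-bit state machine over the characters (alternative decomposition, same cost).

-- ===== PORT A =====
-- A's while-loop: index i, lookahead slice days_str[i:i+2]; the loop body is the
-- recursion step, i advances by 2 or 1.  days_str[i] is in range (guard i < len),
-- so the pyGet? is some; the "" default is unreachable.
def expand_days_any_go (s : List Char) (i : Nat) : List String :=
  if h : i < s.length then
    if PySem.List.slice s (some (i : Int)) (some ((i : Int) + 2)) = ['T', 'H'] then
      "TH" :: expand_days_any_go s (i + 2)
    else
      (((PySem.List.pyGet? s (i : Int)).map (fun c => String.mk [c])).getD "")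
        :: expand_days_any_go s (i + 1)
  else []
termination_by s.length - i

def expand_days_any (days_str : String) : List String :=
  expand_days_any_go days_str.toList 0

-- ===== PORT B =====
-- Source B's loop body: state = (out, pending); pending = a 'T' seen and not yet emitted.
def expand_days_any_step (st : List String × Bool) (ch : Char) : List String × Bool :=
  if st.2 ∧ ch = 'H' then (st.1 ++ ["TH"], false)
  else if ch = 'T' then ((if st.2 then st.1 ++ ["T"] else st.1), true)
  else ((if st.2 then st.1 ++ ["T"] else st.1) ++ [String.mk [ch]], false)

def expand_days_any_alt (days_str : String) : List String :=
  let r := days_str.toList.foldl expand_days_any_step ([], false)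
  if r.2 then r.1 ++ ["T"] else r.1

-- ===== PRECONDITION & SPEC =====
def Spec_expand_days_any (days_str : String) (out : List String) : Prop := out = expand_days_any_alt days_str
instance (days_str : String) (out : List String) : Decidable (Spec_expand_days_any days_str out) := by unfold Spec_expand_days_any; infer_instance

-- ===== CLAIM (what is proved, stated in full; the proofs are below) =====
def Claim_equal_expand_days_any : Prop := ∀ (days_str : String), Dom_expand_days_any days_str → Spec_expand_days_any days_str (expand_days_any days_str)

-- ===== LEMMAS AND PROOFS =====

-- Reference greedy tokenizer (proof-only): both ports are shown equal to it.
def tokSpec : List Char → List String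
  | [] => []
  | c :: r =>
    if c = 'T' ∧ r.head? = some 'H' then "TH" :: tokSpec r.tail
    else String.mk [c] :: tokSpec r
termination_by l => l.length
decreasing_by all_goals simp [List.length_tail]

theorem tokSpec_cons (c : Char) (r : List Char) :
    tokSpec (c :: r) = if c = 'T' ∧ r.head? = some 'H' then "TH" :: tokSpec r.tail
      else String.mk [c] :: tokSpec r := by
  rw [tokSpec]

theorem expand_days_any_go_eq (s : List Char) (i : Nat) :
    expand_days_any_go s i = tokSpec (s.drop i) := by
  unfold expand_days_any_go
  split
  case isTrue h =>
    have hdrop : s.drop i = s[i] :: s.drop (i + 1) := List.drop_eq_getElem_cons h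
    have hslice : PySem.List.slice s (some (i : Int)) (some ((i : Int) + 2))
        = (s.drop i).take 2 := by
      have := PySem.List.slice_natCast_add s i 2
      simpa using this
    split
    case isTrue htok =>
      rw [hslice, hdrop] at htok
      have ih := expand_days_any_go_eq s (i + 2)
      rw [ih, hdrop]
      cases hr : s.drop (i + 1) with
      | nil => simp [hr] at htok
      | cons c2 r2 =>
        rw [hr] at htok
        simp [List.take] at htok
        obtain ⟨h1, h2⟩ := htok
        have hr2 : List.drop (i + 2) s = r2 := by
          rw [show i + 2 = (i + 1) + 1 from rfl, ← List.tail_drop, hr]; rfl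
        simp [tokSpec_cons, hr, h1, h2, hr2]
    case isFalse htok =>
      rw [hslice, hdrop] at htok
      have ih := expand_days_any_go_eq s (i + 1)
      rw [ih, hdrop]
      simp [h]
      rw [hdrop, tokSpec_cons]
      split
      case isTrue hTH =>
        exfalso
        apply htok
        obtain ⟨h1, h2⟩ := hTH
        cases hr : s.drop (i + 1) with
        | nil => rw [hr] at h2; simp at h2
        | cons c2 r2 =>
          rw [hr] at h2; simp at h2
          simp [hr, List.take, h1, h2]
      case isFalse => rfl
  case isFalse h =>
    rw [List.drop_of_length_le (by omega), tokSpec]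
termination_by s.length - i

theorem expand_days_any_fold_inv (s : List Char) :
    ∀ out : List String,
      ((if (s.foldl expand_days_any_step (out, false)).2
        then (s.foldl expand_days_any_step (out, false)).1 ++ ["T"]
        else (s.foldl expand_days_any_step (out, false)).1) = out ++ tokSpec s)
      ∧ ((if (s.foldl expand_days_any_step (out, true)).2
        then (s.foldl expand_days_any_step (out, true)).1 ++ ["T"]
        else (s.foldl expand_days_any_step (out, true)).1) = out ++ tokSpec ('T' :: s)) := by
  induction s with
  | nil =>
    intro out
    refine ⟨by simp [tokSpec], ?_⟩
    simp [tokSpec_cons, tokSpec]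
    decide
  | cons ch r ih =>
    intro out
    constructor
    · by_cases hT : ch = 'T'
      · subst hT
        simp only [List.foldl_cons, expand_days_any_step]
        simp
        exact (ih out).2
      · simp only [List.foldl_cons, expand_days_any_step]
        simp [hT]
        rw [(ih (out ++ [String.mk [ch]])).1]
        simp [tokSpec_cons, hT]
    · by_cases hH : ch = 'H'
      · subst hH
        simp only [List.foldl_cons, expand_days_any_step]
        simp
        rw [(ih (out ++ ["TH"])).1]
        rw [show tokSpec ('T' :: 'H' :: r) = "TH" :: tokSpec r by
          rw [tokSpec_cons]; simp]
        simp
      · by_cases hT : ch = 'T'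
        · subst hT
          simp only [List.foldl_cons, expand_days_any_step]
          simp
          rw [(ih (out ++ ["T"])).2]
          rw [show tokSpec ('T' :: 'T' :: r) = "T" :: tokSpec ('T' :: r) by
            rw [tokSpec_cons]; simp; decide]
          simp
        · simp only [List.foldl_cons, expand_days_any_step]
          simp [hH, hT]
          rw [(ih (out ++ ["T", String.mk [ch]])).1]
          rw [show tokSpec ('T' :: ch :: r) = "T" :: tokSpec (ch :: r) by
            rw [tokSpec_cons]; simp [hH]; decide]
          rw [show tokSpec (ch :: r) = String.mk [ch] :: tokSpec r by
            rw [tokSpec_cons]; simp [hT]]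
          simp

-- ===== VERDICT (by name: the statement is the Claim_ definition above) =====
theorem expand_days_any_spec : Claim_equal_expand_days_any := by
  intro days_str _
  unfold Spec_expand_days_any expand_days_any expand_days_any_alt
  have h1 := expand_days_any_go_eq days_str.toList 0
  have h2 := (expand_days_any_fold_inv days_str.toList []).1
  simp at h1
  simp only [List.nil_append] at h2
  rw [h1]
  exact h2.symm
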